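-- pv_equiv track=rewrite | github.com/javiicarcoba/scripts | Python Scripts/analizatextos.py | analizar_texto
-- ===== SOURCE A (Python) =====
-- def analizar_texto(texto, caracteres_permitidos):
--     texto = texto.lower()
--     diccionario = {}
--     palabra = ""
--     posicion = 0
--     for caracter in texto:
--         if caracter in caracteres_permitidos:
--             palabra += caracter
--         else:
--             if palabra:
--                 if palabra in diccionario:
--                     diccionario[palabra] = (diccionario[palabra][0]+1, diccionario[palabra][1], posicion-len(palabra))
--                 else:
--                     diccionario[palabra] = (1, posicion-len(palabra), posicion-len(palabra))
--                 palabra = ""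
--         posicion += 1
--     if palabra:
--         if palabra in diccionario:
--             diccionario[palabra] = (diccionario[palabra][0]+1, diccionario[palabra][1], posicion-len(palabra))
--         else:
--             diccionario[palabra] = (1, posicion-len(palabra), posicion-len(palabra))
--     return diccionario
-- ===== SOURCE B (Python) =====
-- def analizar_texto(texto, caracteres_permitidos):
--     texto = texto.lower()
--     permitidos = set(caracteres_permitidos)
--     resultado = {}
--     n = len(texto)
--     i = 0
--     while i < n:
--         if texto[i] not in permitidos:
--             i += 1
--             continue
--         j = i + 1
--         while j < n and texto[j] in permitidos:
--             j += 1
--         palabra = texto[i:j]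
--         entrada = resultado.get(palabra)
--         if entrada is None:
--             resultado[palabra] = (1, i, i)
--         else:
--             resultado[palabra] = (entrada[0] + 1, entrada[1], i)
--         i = j
--     return resultado
-- ===== Notes on version B (the rewrite author's own statement) =====
-- stated objective: alternative
-- what changed: A accumulates words character by character in a string buffer with an end-of-word flush duplicated after the loop; B builds set(caracteres_permitidos) once and scans the text with two pointers, slicing out each maximal allowed-character run and updating the dict entry (count, first, last start) in the same step, so there is no pending-word state and no duplicated flush code.
import Mathlib
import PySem

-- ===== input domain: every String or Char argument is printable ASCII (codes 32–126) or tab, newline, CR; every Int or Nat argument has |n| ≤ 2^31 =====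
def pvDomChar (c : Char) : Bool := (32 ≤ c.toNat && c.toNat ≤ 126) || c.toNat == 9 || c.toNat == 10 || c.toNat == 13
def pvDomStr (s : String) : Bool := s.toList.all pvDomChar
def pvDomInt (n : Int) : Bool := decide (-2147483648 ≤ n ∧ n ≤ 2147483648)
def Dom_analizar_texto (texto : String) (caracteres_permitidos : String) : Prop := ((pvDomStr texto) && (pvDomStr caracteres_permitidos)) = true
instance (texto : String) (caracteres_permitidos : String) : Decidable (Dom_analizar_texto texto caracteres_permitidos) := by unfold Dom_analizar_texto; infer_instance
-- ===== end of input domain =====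

-- B replaces A's char-by-char word-accumulator loop with a two-pointer run scanner that emits each
-- maximal allowed-character run with its start index and folds it into the dict in the same step
-- (objective: alternative). A mutates nothing; the equivalence is about the returned dict
-- (as its insertion-ordered item list).

-- ===== PORT A =====
-- diccionario[palabra] update of A: membership test, then tuple rebuild from the stored triple
def aIns (d : PySem.Dict String (Int × Int × Int)) (w : List Char) (start : Int) :
    PySem.Dict String (Int × Int × Int) :=
  let key := String.ofList w
  if d.contains key then
    let old := d.getD key (0, 0, 0)
    d.insert key (old.1 + 1, old.2.1, start)
  else
    d.insert key (1, start, start)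

def aLoop (cp : String) (cs : List Char) (d : PySem.Dict String (Int × Int × Int))
    (palabra : List Char) (pos : Int) : PySem.Dict String (Int × Int × Int) :=
  match cs with
  | [] => if palabra.isEmpty then d else aIns d palabra (pos - palabra.length)
  | c :: rest =>
      if PySem.Chars.isIn [c] cp.toList then
        aLoop cp rest d (palabra ++ [c]) (pos + 1)
      else if palabra.isEmpty then
        aLoop cp rest d [] (pos + 1)
      else
        aLoop cp rest (aIns d palabra (pos - palabra.length)) [] (pos + 1)

-- ===== PORT B =====
-- resultado update of B: a single .get, match on the optional stored triple
def bUpd (d : PySem.Dict String (Int × Int × Int)) (palabra : String) (i : Int) :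
    PySem.Dict String (Int × Int × Int) :=
  match d.get? palabra with
  | none => d.insert palabra (1, i, i)
  | some e => d.insert palabra (e.1 + 1, e.2.1, i)

def bLoop (permitidos : PySem.Set Char) (cs : List Char) (i : Int)
    (d : PySem.Dict String (Int × Int × Int)) : PySem.Dict String (Int × Int × Int) :=
  match cs with
  | [] => d
  | c :: rest =>
      if permitidos.contains c then
        let run := rest.takeWhile (fun x => permitidos.contains x)
        bLoop permitidos (rest.dropWhile (fun x => permitidos.contains x))
          (i + 1 + run.length) (bUpd d (String.ofList (c :: run)) i)
      else
        bLoop permitidos rest (i + 1) d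
termination_by cs.length
decreasing_by
  · simpa using Nat.lt_succ_of_le (List.length_dropWhile_le _ rest)
  · simp


def analizar_texto (texto : String) (caracteres_permitidos : String) :
    List (String × Int × Int × Int) :=
  (aLoop caracteres_permitidos (PySem.Str.lower texto).toList PySem.Dict.empty [] 0).items

def analizar_texto_alt (texto : String) (caracteres_permitidos : String) :
    List (String × Int × Int × Int) :=
  (bLoop (PySem.Set.ofList caracteres_permitidos.toList) (PySem.Str.lower texto).toList 0
    PySem.Dict.empty).items

-- ===== PRECONDITION & SPEC =====
def Spec_analizar_texto (texto : String) (caracteres_permitidos : String) (out : List (String × Int × Int × Int)) : Prop := out = analizar_texto_alt texto caracteres_permitidos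
instance (texto : String) (caracteres_permitidos : String) (out : List (String × Int × Int × Int)) : Decidable (Spec_analizar_texto texto caracteres_permitidos out) := by unfold Spec_analizar_texto; infer_instance

-- ===== CLAIM (what is proved, stated in full; the proofs are below) =====
def Claim_equal_analizar_texto : Prop := ∀ (texto : String) (caracteres_permitidos : String), Dom_analizar_texto texto caracteres_permitidos → Spec_analizar_texto texto caracteres_permitidos (analizar_texto texto caracteres_permitidos)

-- ===== LEMMAS AND PROOFS =====

-- A's per-character membership test `caracter in caracteres_permitidos` (single-char substring
-- search) agrees with B's membership in set(caracteres_permitidos)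
theorem memb_eq (c : Char) (s : List Char) :
    PySem.Chars.isIn [c] s = (PySem.Set.ofList s).contains c := by
  rw [Bool.eq_iff_iff]
  simp [PySem.Chars.isIn_iff_infix, List.singleton_infix_iff, PySem.Set.mem_ofList]

theorem aIns_eq_bUpd (d : PySem.Dict String (Int × Int × Int)) (w : List Char) (start : Int) :
    aIns d w start = bUpd d (String.ofList w) start := by
  unfold aIns bUpd
  cases hg : d.get? (String.ofList w) with
  | none =>
      have hc : d.contains (String.ofList w) = false := by
        rw [PySem.Dict.contains_eq_isSome_get?, hg]; rfl
      simp [hc]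
  | some e =>
      have hc : d.contains (String.ofList w) = true := by
        rw [PySem.Dict.contains_eq_isSome_get?, hg]; rfl
      simp [hc, PySem.Dict.getD_eq_get?_getD, hg]

theorem aLoop_eq_bLoop (cp : String) (cs : List Char)
    (d : PySem.Dict String (Int × Int × Int)) (w : List Char) (pos : Int) :
    aLoop cp cs d w pos =
      (if w.isEmpty then bLoop (PySem.Set.ofList cp.toList) cs pos d
       else
         bLoop (PySem.Set.ofList cp.toList)
           (cs.dropWhile (fun x => (PySem.Set.ofList cp.toList).contains x))
           (pos + (cs.takeWhile (fun x => (PySem.Set.ofList cp.toList).contains x)).length)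
           (bUpd d (String.ofList (w ++ cs.takeWhile (fun x => (PySem.Set.ofList cp.toList).contains x)))
             (pos - w.length))) := by
  induction cs generalizing d w pos with
  | nil =>
      cases w with
      | nil => simp [aLoop, bLoop]
      | cons a as => simp [aLoop, bLoop, aIns_eq_bUpd]
  | cons c rest ih =>
      by_cases hc : c ∈ cp.toList
      · have hA : PySem.Chars.isIn [c] cp.toList = true := by
          rw [memb_eq, Bool.eq_iff_iff]; simp [PySem.Set.mem_ofList, hc]
        have hB : (PySem.Set.ofList cp.toList).contains c = true := by
          rw [Bool.eq_iff_iff]; simp [PySem.Set.mem_ofList, hc]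
        simp only [aLoop, hA, if_true]
        rw [ih]
        cases w with
        | nil =>
            simp only [List.nil_append, List.singleton_append, List.isEmpty_cons,
              Bool.false_eq_true, if_false]
            rw [bLoop]
            simp only [hB, if_true]
            congr 2
            all_goals simp
        | cons a as =>
            simp only [List.cons_append, List.isEmpty_cons, Bool.false_eq_true, if_false,
              List.takeWhile_cons, List.dropWhile_cons, hB, if_true, List.append_assoc]
            simp only [List.nil_append, List.length_cons, List.length_append,
              List.length_nil]
            push_cast
            ring_nf
      · have hA : PySem.Chars.isIn [c] cp.toList = false := by
          rw [memb_eq, Bool.eq_iff_iff]; simp [PySem.Set.mem_ofList, hc]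
        have hB : (PySem.Set.ofList cp.toList).contains c = false := by
          rw [Bool.eq_iff_iff]; simp [PySem.Set.mem_ofList, hc]
        simp only [aLoop, hA, Bool.false_eq_true, if_false]
        cases w with
        | nil =>
            simp only [List.isEmpty_nil, if_true]
            rw [ih, bLoop]
            simp [hc]
        | cons a as =>
            simp only [List.isEmpty_cons, Bool.false_eq_true, if_false,
              List.takeWhile_cons, List.dropWhile_cons, hB]
            rw [ih]
            simp only [List.isEmpty_nil, if_true]
            rw [bLoop]
            simp only [hB, Bool.false_eq_true, if_false]
            rw [aIns_eq_bUpd]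
            simp only [List.append_nil, List.length_cons, List.length_nil]
            push_cast
            ring_nf

-- ===== VERDICT (by name: the statement is the Claim_ definition above) =====
theorem analizar_texto_spec : Claim_equal_analizar_texto := by
  intro texto cp _
  unfold Spec_analizar_texto analizar_texto analizar_texto_alt
  rw [aLoop_eq_bLoop]
  simp
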